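-- pv_equiv track=rewrite | github.com/lupppig/cachio | httpcache.py | _get_headers_as_dict
-- ===== SOURCE A (Python) =====
-- from collections import defaultdict
-- from typing import Dict, List, Tuple
--
-- def _get_headers_as_dict(
--     headers: List[Tuple[str, str]]
-- ) -> Dict[str, List[str]]:
--     raw_headers = headers
--     headers = defaultdict(list)
--     for key, value in raw_headers:
--         headers[key].append(value)
--     return dict(headers)
-- ===== SOURCE B (Python) =====
-- from typing import Dict, List, Tuple
--
-- def _get_headers_as_dict(
--     headers: List[Tuple[str, str]]
-- ) -> Dict[str, List[str]]:
--     keys = dict.fromkeys(k for k, _ in headers)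
--     return {k: [v for kk, v in headers if kk == k] for k in keys}
-- ===== Notes on version B (the rewrite author's own statement) =====
-- stated objective: alternative
-- what changed: Replaces the single accumulating defaultdict pass with a distinct-keys pass (dict.fromkeys) plus a per-key filtering scan in a dict comprehension.
import Mathlib
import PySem

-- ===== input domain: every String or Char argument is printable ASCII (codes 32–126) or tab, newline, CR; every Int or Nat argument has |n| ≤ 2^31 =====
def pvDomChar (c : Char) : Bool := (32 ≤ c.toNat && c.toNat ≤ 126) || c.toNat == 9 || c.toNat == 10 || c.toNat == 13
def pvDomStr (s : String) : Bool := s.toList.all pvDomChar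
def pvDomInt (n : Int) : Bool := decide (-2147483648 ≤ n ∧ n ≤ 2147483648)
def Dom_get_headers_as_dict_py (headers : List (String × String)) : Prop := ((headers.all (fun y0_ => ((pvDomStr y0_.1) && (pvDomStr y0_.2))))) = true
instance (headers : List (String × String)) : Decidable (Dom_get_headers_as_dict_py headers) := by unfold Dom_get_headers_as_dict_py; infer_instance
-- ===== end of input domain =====

-- B groups with a distinct-keys pass plus a per-key filtering scan instead of A's single accumulating defaultdict pass (objective: alternative decomposition, not faster).

-- ===== PORT A =====
-- for key, value in raw_headers: headers[key].append(value)   (defaultdict(list))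
def get_headers_as_dict_py (headers : List (String × String)) : List (String × List String) :=
  (headers.foldl (fun d p => d.modify p.1 [] (· ++ [p.2])) PySem.Dict.empty).items

-- ===== PORT B =====
-- keys = dict.fromkeys(k for k, _ in headers); {k: [v for kk, v in headers if kk == k] for k in keys}
def get_headers_as_dict_py_alt (headers : List (String × String)) : List (String × List String) :=
  (PySem.List.dedup (headers.map (·.1))).map
    (fun k => (k, (headers.filter (fun p => p.1 == k)).map (·.2)))

-- ===== PRECONDITION & SPEC =====
def Spec_get_headers_as_dict_py (headers : List (String × String)) (out : List (String × List String)) : Prop := out = get_headers_as_dict_py_alt headers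
instance (headers : List (String × String)) (out : List (String × List String)) : Decidable (Spec_get_headers_as_dict_py headers out) := by unfold Spec_get_headers_as_dict_py; infer_instance

-- ===== CLAIM (what is proved, stated in full; the proofs are below) =====
def Claim_equal_get_headers_as_dict_py : Prop := ∀ (headers : List (String × String)), Dom_get_headers_as_dict_py headers → Spec_get_headers_as_dict_py headers (get_headers_as_dict_py headers)

-- ===== LEMMAS AND PROOFS =====

-- The grouping fold's key list is the deduplicated key list, and each key's value is the filtered values.
theorem groupFold_items (headers : List (String × String)) :
    (headers.foldl (fun d p => d.modify p.1 [] (· ++ [p.2])) PySem.Dict.empty).items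
      = (PySem.List.dedup (headers.map (·.1))).map
          (fun k => (k, (headers.filter (fun p => p.1 == k)).map (·.2))) := by
  set d := headers.foldl (fun d p => d.modify p.1 [] (· ++ [p.2])) PySem.Dict.empty with hd
  have hnd : d.keys.Nodup := by
    rw [hd]
    exact PySem.Dict.nodup_keys_foldl_modify_key headers (·.1) [] (fun d p => (· ++ [p.2]))
      PySem.Dict.empty (by simp)
  have hkeys : d.keys = PySem.List.dedup (headers.map (·.1)) := by
    rw [hd, PySem.Dict.keys_foldl_modify_key]
    simp [PySem.Dict.keys_empty, PySem.Set.update_nil_left, PySem.List.dedup_eq_ofList]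
  have hget : ∀ k, d.getD k [] = (headers.filter (fun p => p.1 == k)).map (·.2) := by
    intro k
    rw [hd, PySem.Dict.getD_foldl_modify_append]
    simp [PySem.Dict.getD_empty]
  calc d.items = d.keys.map (fun k => (k, d.getD k [])) := PySem.Dict.items_eq_map_keys d hnd []
    _ = (PySem.List.dedup (headers.map (·.1))).map
          (fun k => (k, (headers.filter (fun p => p.1 == k)).map (·.2))) := by
        rw [hkeys]; exact List.map_congr_left (fun k _ => by rw [hget k])

-- ===== VERDICT (by name: the statement is the Claim_ definition above) =====
theorem get_headers_as_dict_py_spec : Claim_equal_get_headers_as_dict_py := by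
  intro headers _
  unfold Spec_get_headers_as_dict_py get_headers_as_dict_py get_headers_as_dict_py_alt
  exact groupFold_items headers
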